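-- pv_equiv track=rewrite | github.com/jankristoffercheng/CSC713M | Final Project/features.py | getNegated
-- ===== SOURCE A (Python) =====
-- NEGATE = '--n'
--
-- NEGATIONS = [
--     'no',
--     'not',
--     'none',
--     'nobody',
--     'nothing',
--     'neither',
--     'nowhere'
--     'never',
--     'isn\'t',
--     'didn\'t',
--     'don\'t',
--     'doesn\'t',
--     'aren\'t'
--     'hasn\'t',
--     'haven\'t',
--     'hadn\'t',
--     'can\'t',
--     'couldn\'t',
--     'wouldn\'t',
--     'won\'t',
--     'shouldn\'t',
--     'weren\'t',
--     'wasn\'t',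
--     'ain\'t',
--     'needn\'t',
--     'dosen\'t',
-- ]
--
-- PUNCTUATIONS = [
--     '.',
--     ',',
--     '?',
--     '!',
--     ';'
-- ]
--
-- def getNegated(texts):
--     negatedTexts = []
--     for text in texts:
--         words= text.split()
--         i = 0
--         while i < len(words):
--             word = words[i]
--             if any(word in s for s in NEGATIONS):
--                 i += 1
--                 while i < len(words):
--                     if any(words[i].endswith(punctuation) for punctuation in PUNCTUATIONS):
--                         break;
--                     if not words[i].endswith(NEGATE):
--                         words[i] += NEGATE
--                     i += 1
--             i += 1
--         negatedTexts.append(' '.join(words))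
--     return negatedTexts
-- ===== SOURCE B (Python) =====
-- NEGATE = '--n'
--
-- NEGATIONS = [
--     'no',
--     'not',
--     'none',
--     'nobody',
--     'nothing',
--     'neither',
--     'nowhere'
--     'never',
--     'isn\'t',
--     'didn\'t',
--     'don\'t',
--     'doesn\'t',
--     'aren\'t'
--     'hasn\'t',
--     'haven\'t',
--     'hadn\'t',
--     'can\'t',
--     'couldn\'t',
--     'wouldn\'t',
--     'won\'t',
--     'shouldn\'t',
--     'weren\'t',
--     'wasn\'t',
--     'ain\'t',
--     'needn\'t',
--     'dosen\'t',
-- ]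
--
-- PUNCTUATIONS = [
--     '.',
--     ',',
--     '?',
--     '!',
--     ';'
-- ]
--
--
-- def _mark(w):
--     return w if w.endswith(NEGATE) else w + NEGATE
--
--
-- def _negate_words(rest):
--     # segment recursion: slice at the first trigger, mark the slice up to the
--     # first punctuation-ending word, recurse on what follows it
--     k = next((j for j, w in enumerate(rest)
--               if any(w in s for s in NEGATIONS)), None)
--     if k is None:
--         return rest
--     tail = rest[k + 1:]
--     m = next((j for j, w in enumerate(tail)
--               if any(w.endswith(p) for p in PUNCTUATIONS)), len(tail))
--     span = [_mark(w) for w in tail[:m]]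
--     stop = tail[m:m + 1]  # the punctuation word itself, unmarked and skipped
--     return rest[:k + 1] + span + stop + _negate_words(tail[m + 1:])
--
--
-- def getNegated(texts):
--     return [' '.join(_negate_words(text.split())) for text in texts]
-- ===== Notes on version B (the rewrite author's own statement) =====
-- stated objective: alternative
-- what changed: Replaced A's index-mutating outer/inner while loops over a shared cursor by a segment recursion: find the first trigger, slice the word list there, mark the slice up to the first punctuation-ending word with a comprehension, and recurse on the remainder.
import Mathlib
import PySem

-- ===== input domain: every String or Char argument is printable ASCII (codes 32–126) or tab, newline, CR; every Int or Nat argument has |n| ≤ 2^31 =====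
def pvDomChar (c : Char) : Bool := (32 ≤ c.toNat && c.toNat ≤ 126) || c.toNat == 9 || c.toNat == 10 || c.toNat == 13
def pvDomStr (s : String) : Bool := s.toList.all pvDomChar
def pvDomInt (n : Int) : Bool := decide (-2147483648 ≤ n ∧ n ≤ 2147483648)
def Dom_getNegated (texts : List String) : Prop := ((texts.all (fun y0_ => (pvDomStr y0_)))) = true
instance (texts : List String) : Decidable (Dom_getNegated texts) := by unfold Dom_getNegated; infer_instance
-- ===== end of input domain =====

-- B replaces A's index-mutating nested while loops by a segment recursion: slice at the first
-- trigger, mark the slice up to the first punctuation word, recurse on the remainder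
-- (objective: alternative decomposition); return values agree on all inputs, no mutation.

-- shared module constants (the concatenated-literal typos 'nowhere' 'never' and 'aren't' 'hasn't' kept verbatim)
def pvNEGATE : String := "--n"

def pvNEGATIONS : List String :=
  ["no", "not", "none", "nobody", "nothing", "neither", "nowherenever",
   "isn't", "didn't", "don't", "doesn't", "aren'thasn't", "haven't", "hadn't",
   "can't", "couldn't", "wouldn't", "won't", "shouldn't", "weren't", "wasn't",
   "ain't", "needn't", "dosen't"]

def pvPUNCTUATIONS : List String := [".", ",", "?", "!", ";"]

-- any(word in s for s in NEGATIONS)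
def pvIsTrigger (w : String) : Bool := pvNEGATIONS.any (fun s => PySem.Str.isIn w s)

-- any(w.endswith(p) for p in PUNCTUATIONS)
def pvEndsPunct (w : String) : Bool := pvPUNCTUATIONS.any (fun p => PySem.Str.endswith w p)

-- w if w.endswith(NEGATE) else w + NEGATE
def pvMark (w : String) : String := if PySem.Str.endswith w pvNEGATE then w else w ++ pvNEGATE

-- ===== PORT A =====
-- the inner while loop: mutates words[i] (List.set) until a punctuation-ending word or the end;
-- returns the updated list and the index it stopped at. fuel is only a totality guard: every
-- step increases i, so any fuel ≥ ws.length - i runs the loop to its Python stopping condition.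
def pvInnerA (fuel : Nat) (ws : List String) (i : Nat) : List String × Nat :=
  match fuel with
  | 0 => (ws, i)
  | fuel + 1 =>
    if h : i < ws.length then
      if pvEndsPunct ws[i] then (ws, i)
      else pvInnerA fuel (ws.set i (pvMark ws[i])) (i + 1)
    else (ws, i)

-- the outer while loop (fuel likewise only a totality guard)
def pvOuterA (fuel : Nat) (ws : List String) (i : Nat) : List String :=
  match fuel with
  | 0 => ws
  | fuel + 1 =>
    if h : i < ws.length then
      if pvIsTrigger ws[i] then
        let r := pvInnerA ws.length ws (i + 1)
        pvOuterA fuel r.1 (r.2 + 1)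
      else pvOuterA fuel ws (i + 1)
    else ws

def getNegated (texts : List String) : List String :=
  texts.map (fun text =>
    let ws := PySem.Str.split₀ text
    PySem.Str.join " " (pvOuterA ws.length ws 0))

-- ===== PORT B =====
-- next((j for j, w in enumerate(xs) if p w), None)
def pvFindIdx (p : String → Bool) : List String → Option Nat
  | [] => none
  | w :: rest => if p w then some 0 else (pvFindIdx p rest).map (· + 1)

-- termination bound for the segment recursion (cited by decreasing_by below)
theorem pvFindIdx_some_lt (p : String → Bool) : ∀ (ws : List String) (k : Nat),
    pvFindIdx p ws = some k → k < ws.length := by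
  intro ws
  induction ws with
  | nil => intro k h; exact absurd h (by simp [pvFindIdx])
  | cons w rest ih =>
    intro k h
    rw [pvFindIdx] at h
    by_cases hp : p w = true
    · rw [if_pos hp] at h
      cases h
      simp
    · rw [if_neg hp] at h
      cases hf : pvFindIdx p rest with
      | none => rw [hf] at h; exact absurd h (by simp)
      | some j =>
        rw [hf] at h
        simp only [Option.map_some, Option.some.injEq] at h
        have := ih j hf
        simp only [List.length_cons]
        omega

-- segment recursion: slice at the first trigger, mark tail[:m], keep tail[m:m+1] untouched,
-- recurse on tail[m+1:]
def pvNegateWords (rest : List String) : List String :=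
  match hk : pvFindIdx pvIsTrigger rest with
  | none => rest
  | some k =>
    let tail := rest.drop (k + 1)
    let m := (pvFindIdx pvEndsPunct tail).getD tail.length
    rest.take (k + 1) ++ (tail.take m).map pvMark ++ (tail.drop m).take 1 ++
      pvNegateWords (tail.drop (m + 1))
  termination_by rest.length
  decreasing_by
    have hk' := pvFindIdx_some_lt pvIsTrigger rest k hk
    simp only [List.length_drop]
    omega

def getNegated_alt (texts : List String) : List String :=
  texts.map (fun text => PySem.Str.join " " (pvNegateWords (PySem.Str.split₀ text)))

-- ===== PRECONDITION & SPEC =====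
def Spec_getNegated (texts : List String) (out : List String) : Prop := out = getNegated_alt texts
instance (texts : List String) (out : List String) : Decidable (Spec_getNegated texts out) := by unfold Spec_getNegated; infer_instance

-- ===== CLAIM (what is proved, stated in full; the proofs are below) =====
def Claim_equal_getNegated : Prop := ∀ (texts : List String), Dom_getNegated texts → Spec_getNegated texts (getNegated texts)

-- ===== LEMMAS AND PROOFS =====

-- proof-only intermediate: a single flag-carrying pass, bridge between A's loops and B's segments
def pvMarkB (negating : Bool) (ws : List String) : List String :=
  match ws with
  | [] => []
  | w :: rest =>
    if negating && pvEndsPunct w then w :: pvMarkB false rest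
    else if negating then pvMark w :: pvMarkB true rest
    else w :: pvMarkB (pvIsTrigger w) rest

theorem pvOuterA_stop (fuel : Nat) (ws : List String) (i : Nat) (h : ws.length ≤ i) :
    pvOuterA fuel ws i = ws := by
  cases fuel with
  | zero => rfl
  | succ fuel => rw [pvOuterA, dif_neg (Nat.not_lt.mpr h)]

theorem pvInnerA_stop (fuel : Nat) (ws : List String) (i : Nat) (h : ws.length ≤ i) :
    pvInnerA fuel ws i = (ws, i) := by
  cases fuel with
  | zero => rfl
  | succ fuel => rw [pvInnerA, dif_neg (Nat.not_lt.mpr h)]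

theorem pvMarkB_nil (b : Bool) : pvMarkB b [] = [] := rfl

theorem pvMarkB_false_cons (w : String) (rest : List String) :
    pvMarkB false (w :: rest) = w :: pvMarkB (pvIsTrigger w) rest := rfl

theorem pvMarkB_true_cons_punct (w : String) (rest : List String) (hp : pvEndsPunct w = true) :
    pvMarkB true (w :: rest) = w :: pvMarkB false rest := by
  rw [pvMarkB]; simp only [Bool.true_and, hp, if_true]

theorem pvMarkB_true_cons_nopunct (w : String) (rest : List String) (hp : pvEndsPunct w = false) :
    pvMarkB true (w :: rest) = pvMark w :: pvMarkB true rest := by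
  rw [pvMarkB]; simp only [Bool.true_and, hp, Bool.false_eq_true, if_false, if_true]

-- A-side: with enough fuel, the outer loop from i produces the untouched prefix plus the
-- flag pass (flag off) over the rest; inner-then-outer is the flag pass with the flag on.
theorem pvLoops_eq : ∀ (k : Nat) (ws : List String) (i : Nat), ws.length - i ≤ k →
    (∀ nO, ws.length - i ≤ nO → pvOuterA nO ws i = ws.take i ++ pvMarkB false (ws.drop i)) ∧
    (∀ nI nO, ws.length - i ≤ nI → ws.length - i ≤ nO →
      pvOuterA nO (pvInnerA nI ws i).1 ((pvInnerA nI ws i).2 + 1) =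
        ws.take i ++ pvMarkB true (ws.drop i)) := by
  intro k
  induction k with
  | zero =>
    intro ws i hk
    have hge : ws.length ≤ i := by omega
    constructor
    · intro nO _
      rw [pvOuterA_stop nO ws i hge, List.take_of_length_le hge, List.drop_of_length_le hge,
        pvMarkB_nil, List.append_nil]
    · intro nI nO _ _
      rw [pvInnerA_stop nI ws i hge]
      rw [pvOuterA_stop nO ws (i + 1) (by omega), List.take_of_length_le hge,
        List.drop_of_length_le hge, pvMarkB_nil, List.append_nil]
  | succ k ih =>
    intro ws i hk
    by_cases h : i < ws.length
    · have hdrop := List.drop_eq_getElem_cons h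
      have htake : ws.take (i + 1) = ws.take i ++ [ws[i]] := by
        rw [List.take_add_one, List.getElem?_eq_getElem h, Option.toList_some]
      constructor
      · intro nO hnO
        cases nO with
        | zero => omega
        | succ nO =>
          rw [pvOuterA, dif_pos h]
          cases ht : pvIsTrigger ws[i] with
          | false =>
            rw [if_neg (by decide)]
            have h1 := (ih ws (i + 1) (by omega)).1 nO (by omega)
            rw [h1, hdrop, pvMarkB_false_cons, ht, htake]
            simp only [List.append_assoc, List.singleton_append]
          | true =>
            rw [if_pos rfl]
            have h2 := (ih ws (i + 1) (by omega)).2 ws.length nO (by omega) (by omega)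
            rw [h2, hdrop, pvMarkB_false_cons, ht, htake]
            simp only [List.append_assoc, List.singleton_append]
      · intro nI nO hnI hnO
        cases nI with
        | zero => omega
        | succ nI =>
          rw [pvInnerA, dif_pos h]
          cases hp : pvEndsPunct ws[i] with
          | false =>
            rw [if_neg (by decide)]
            have hset : ws.set i (pvMark ws[i]) = ws.take i ++ pvMark ws[i] :: ws.drop (i + 1) := by
              rw [List.set_eq_take_append_cons_drop]; rw [if_pos h]
            have hlen2 : (ws.set i (pvMark ws[i])).length = ws.length := by simp
            have h2 := (ih (ws.set i (pvMark ws[i])) (i + 1) (by omega)).2 nI nO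
              (by omega) (by omega)
            have hlentake : (ws.take i).length = i := by
              simp [List.length_take]; omega
            have htake2 : (ws.set i (pvMark ws[i])).take (i + 1) = ws.take i ++ [pvMark ws[i]] := by
              rw [hset, show i + 1 = (ws.take i).length + 1 by rw [hlentake]]
              simp [List.take_append]
            have hdrop2 : (ws.set i (pvMark ws[i])).drop (i + 1) = ws.drop (i + 1) := by
              rw [hset, show i + 1 = (ws.take i).length + 1 by rw [hlentake]]
              simp [List.drop_append]
            rw [h2, htake2, hdrop2, hdrop, pvMarkB_true_cons_nopunct _ _ hp]
            simp only [List.append_assoc, List.singleton_append]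
          | true =>
            rw [if_pos rfl]
            have h1 := (ih ws (i + 1) (by omega)).1 nO (by omega)
            rw [h1, hdrop, pvMarkB_true_cons_punct _ _ hp, htake]
            simp only [List.append_assoc, List.singleton_append]
    · have hge : ws.length ≤ i := by omega
      constructor
      · intro nO _
        rw [pvOuterA_stop nO ws i hge, List.take_of_length_le hge, List.drop_of_length_le hge,
          pvMarkB_nil, List.append_nil]
      · intro nI nO _ _
        rw [pvInnerA_stop nI ws i hge]
        rw [pvOuterA_stop nO ws (i + 1) (by omega), List.take_of_length_le hge,
          List.drop_of_length_le hge, pvMarkB_nil, List.append_nil]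

theorem pvOuterA_eq_markB (ws : List String) : pvOuterA ws.length ws 0 = pvMarkB false ws := by
  have := (pvLoops_eq ws.length ws 0 (by omega)).1 ws.length (by omega)
  simpa using this

-- B-side bridge: the flag-on pass is "mark up to the first punctuation word, then flag off"
def pvMOf (ws : List String) : Nat := (pvFindIdx pvEndsPunct ws).getD ws.length

theorem pvMOf_cons (w : String) (rest : List String) :
    pvMOf (w :: rest) = if pvEndsPunct w then 0 else pvMOf rest + 1 := by
  cases hp : pvEndsPunct w with
  | true => simp [pvMOf, pvFindIdx, hp]
  | false =>
    simp only [pvMOf, pvFindIdx, hp, Bool.false_eq_true, if_false]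
    cases pvFindIdx pvEndsPunct rest with
    | none => simp
    | some j => simp

theorem pvMarkB_true_eq : ∀ (ws : List String),
    pvMarkB true ws =
      (ws.take (pvMOf ws)).map pvMark ++ (ws.drop (pvMOf ws)).take 1 ++
        pvMarkB false (ws.drop (pvMOf ws + 1)) := by
  intro ws
  induction ws with
  | nil => simp [pvMarkB_nil, pvMOf, pvFindIdx]
  | cons w rest ih =>
    cases hp : pvEndsPunct w with
    | true =>
      rw [pvMarkB_true_cons_punct _ _ hp, pvMOf_cons, if_pos hp]
      simp
    | false =>
      rw [pvMarkB_true_cons_nopunct _ _ hp, pvMOf_cons, hp]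
      simp only [Bool.false_eq_true, if_false, List.take_succ_cons, List.drop_succ_cons,
        List.map_cons, List.cons_append, ih]

theorem pvMarkB_false_of_find_none : ∀ (ws : List String),
    pvFindIdx pvIsTrigger ws = none → pvMarkB false ws = ws := by
  intro ws
  induction ws with
  | nil => intro _; rfl
  | cons w rest ih =>
    intro h
    by_cases ht : pvIsTrigger w = true
    · simp [pvFindIdx, ht] at h
    · have ht' : pvIsTrigger w = false := by revert ht; cases pvIsTrigger w <;> simp
      rw [pvFindIdx, if_neg ht] at h
      have h' : pvFindIdx pvIsTrigger rest = none := by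
        cases hf : pvFindIdx pvIsTrigger rest with
        | none => rfl
        | some j => rw [hf] at h; exact absurd h (by simp)
      rw [pvMarkB_false_cons, ht', ih h']

theorem pvMarkB_false_of_find_some : ∀ (ws : List String) (k : Nat),
    pvFindIdx pvIsTrigger ws = some k →
    pvMarkB false ws = ws.take (k + 1) ++ pvMarkB true (ws.drop (k + 1)) := by
  intro ws
  induction ws with
  | nil => intro k h; simp [pvFindIdx] at h
  | cons w rest ih =>
    intro k h
    by_cases ht : pvIsTrigger w = true
    · rw [pvFindIdx, if_pos ht] at h
      cases h
      rw [pvMarkB_false_cons, ht]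
      simp
    · have ht' : pvIsTrigger w = false := by revert ht; cases pvIsTrigger w <;> simp
      rw [pvFindIdx, if_neg ht] at h
      cases hf : pvFindIdx pvIsTrigger rest with
      | none => rw [hf] at h; exact absurd h (by simp)
      | some j =>
        rw [hf] at h
        simp only [Option.map_some, Option.some.injEq] at h
        subst h
        rw [pvMarkB_false_cons, ht', ih j hf]
        simp

theorem pvNegateWords_eq_markB : ∀ (n : Nat) (ws : List String), ws.length ≤ n →
    pvNegateWords ws = pvMarkB false ws := by
  intro n
  induction n with
  | zero =>
    intro ws h
    have hw : ws = [] := List.eq_nil_of_length_eq_zero (by omega)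
    subst hw
    rw [pvNegateWords]
    rfl
  | succ n ih =>
    intro ws h
    rw [pvNegateWords]
    split
    next hk => rw [pvMarkB_false_of_find_none ws hk]
    next k hk =>
      have hklt := pvFindIdx_some_lt pvIsTrigger ws k hk
      rw [pvMarkB_false_of_find_some ws k hk, pvMarkB_true_eq]
      have hrec : pvNegateWords ((ws.drop (k + 1)).drop (pvMOf (ws.drop (k + 1)) + 1)) =
          pvMarkB false ((ws.drop (k + 1)).drop (pvMOf (ws.drop (k + 1)) + 1)) := by
        apply ih
        simp only [List.length_drop]
        omega
      simp only [pvMOf] at hrec ⊢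
      rw [hrec]
      simp [List.append_assoc]

-- ===== VERDICT (by name: the statement is the Claim_ definition above) =====
theorem getNegated_spec : Claim_equal_getNegated := by
  intro texts _
  unfold Spec_getNegated getNegated getNegated_alt
  simp only [List.map_inj_left]
  intro text _
  rw [pvOuterA_eq_markB, pvNegateWords_eq_markB (PySem.Str.split₀ text).length _ le_rfl]
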